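-- pv_equiv track=rewrite | github.com/mfurga-cs/asd | tydzien9/dump.py | close_pedestrians
-- ===== SOURCE A (Python) =====
-- from queue import Queue
--
-- def BFS(T, s):
--
--     n = len(T)
--     Q = Queue()
--     visited = [False] * n
--     distance = [-1] * n
--     parent = [None] * n
--     distance[s] = 0
--     visited[s] = True
--     Q.put(s)
--
--     while not Q.empty():
--         u = Q.get()
--
--
--         for v in range(n):
--             if T[u][v] != 0 and not visited[v]:
--                 visited[v] = True
--                 distance[v] = distance[u] + 1
--                 parent[v] = u
--                 Q.put(v)
--
--     return distance
--
-- def close_pedestrians(G):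
--     n = len(G)
--     H = [[0] * n for i in range(n)]
--     for i in range(n):
--         distance = BFS(G, i)
--         for j in range(n):
--             if distance[j] > 0:
--                 H[i][j] = 1
--
--     return H
-- ===== SOURCE B (Python) =====
-- def close_pedestrians(G):
--     n = len(G)
--     adj = [[v for v in range(n) if G[u][v] != 0] for u in range(n)]
--     H = []
--     for s in range(n):
--         seen = [False] * n
--         seen[s] = True
--         stack = [s]
--         while stack:
--             u = stack.pop()
--             for v in adj[u]:
--                 if not seen[v]:
--                     seen[v] = True
--                     stack.append(v)
--         H.append([1 if seen[j] and j != s else 0 for j in range(n)])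
--     return H
-- ===== Notes on version B (the rewrite author's own statement) =====
-- stated objective: faster
-- what changed: A runs a queue-based BFS that rescans the whole n-entry matrix row for every dequeued vertex; B builds adjacency lists once and runs an iterative stack-based DFS over them, so each traversal touches only actual edges.
import Mathlib
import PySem

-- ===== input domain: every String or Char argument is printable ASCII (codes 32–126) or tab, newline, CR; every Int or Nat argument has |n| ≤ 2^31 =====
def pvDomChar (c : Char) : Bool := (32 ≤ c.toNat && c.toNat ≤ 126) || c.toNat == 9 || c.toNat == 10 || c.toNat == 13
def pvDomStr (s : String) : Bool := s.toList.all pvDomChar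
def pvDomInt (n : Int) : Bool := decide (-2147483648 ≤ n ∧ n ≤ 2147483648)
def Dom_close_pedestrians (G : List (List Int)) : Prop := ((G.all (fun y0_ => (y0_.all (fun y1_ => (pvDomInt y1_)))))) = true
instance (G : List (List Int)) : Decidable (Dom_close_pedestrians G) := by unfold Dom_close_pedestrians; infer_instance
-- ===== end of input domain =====

-- B replaces A's O(n^2)-per-source matrix-scanning queue BFS by adjacency lists built
-- once plus an O(n+m)-per-source stack DFS; return values agree (only the reachable
-- set matters, not the visit order).

-- ===== PORT A =====
-- entry test T[u][v] != 0 (rows in range under Pre_)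
def pvEdge (G : List (List Int)) (u v : Nat) : Bool := (G.getD u []).getD v 0 != 0

-- BFS inner loop: for v in range(n): if T[u][v] != 0 and not visited[v]: …
-- state = (visited, distance, parent, queue); Q.put = append at the back
def pvBfsStep (G : List (List Int)) (n u : Nat)
    (st : List Bool × List Int × List (Option Nat) × List Nat) :
    List Bool × List Int × List (Option Nat) × List Nat :=
  (List.range n).foldl (fun st v =>
    if pvEdge G u v = true ∧ st.1.getD v false = false then
      (st.1.set v true,
       st.2.1.set v (st.2.1.getD u 0 + 1),
       st.2.2.1.set v (some u),
       st.2.2.2 ++ [v])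
    else st) st

-- while not Q.empty(): u = Q.get(); …   (fuel n suffices: each iteration pops one
-- vertex and every vertex is enqueued at most once)
def pvBfsLoop (G : List (List Int)) (n : Nat) :
    Nat → List Bool → List Int → List (Option Nat) → List Nat →
    List Bool × List Int × List (Option Nat)
  | 0, vis, dist, par, _ => (vis, dist, par)
  | _ + 1, vis, dist, par, [] => (vis, dist, par)
  | f + 1, vis, dist, par, u :: q =>
      match pvBfsStep G n u (vis, dist, par, q) with
      | (vis', dist', par', q') => pvBfsLoop G n f vis' dist' par' q'

def pvBFS (G : List (List Int)) (s : Nat) : List Int :=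
  let n := G.length
  let visited := (List.replicate n false).set s true
  let distance := (List.replicate n (-1 : Int)).set s 0
  let parent : List (Option Nat) := List.replicate n (none : Option Nat)
  (pvBfsLoop G n n visited distance parent [s]).2.1

def close_pedestrians (G : List (List Int)) : List (List Int) :=
  let n := G.length
  (List.range n).map (fun i =>
    let distance := pvBFS G i
    (List.range n).map (fun j => if 0 < distance.getD j 0 then (1 : Int) else 0))

-- ===== PORT B =====
-- adj[u] = [v for v in range(n) if G[u][v] != 0]
def pvAdj (G : List (List Int)) (n u : Nat) : List Nat :=
  (List.range n).filter (fun v => pvEdge G u v)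

-- for v in adj[u]: if not seen[v]: seen[v] = True; stack.append(v)
-- (Lean stack list is the python stack reversed: head = top)
def pvDfsStep (adjU : List Nat) (st : List Nat × List Bool) : List Nat × List Bool :=
  adjU.foldl (fun st v =>
    if st.2.getD v false = false then (v :: st.1, st.2.set v true) else st) st

-- while stack: u = stack.pop(); …   (fuel n suffices as for A)
def pvDfsLoop (adj : Nat → List Nat) : Nat → List Nat → List Bool → List Bool
  | 0, _, seen => seen
  | _ + 1, [], seen => seen
  | f + 1, u :: stk, seen =>
      match pvDfsStep (adj u) (stk, seen) with
      | (stk', seen') => pvDfsLoop adj f stk' seen'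

def close_pedestrians_alt (G : List (List Int)) : List (List Int) :=
  let n := G.length
  (List.range n).map (fun s =>
    let seen := pvDfsLoop (pvAdj G n) n [s] ((List.replicate n false).set s true)
    (List.range n).map (fun j =>
      if seen.getD j false = true ∧ j ≠ s then (1 : Int) else 0))

-- ===== PRECONDITION & SPEC =====
-- Pre_ excludes exactly the inputs on which the Python A raises IndexError:
-- some row of G shorter than len(G) (both BFS's T[u][v] and B's adjacency build index
-- the full n×n square).
def Pre_close_pedestrians (G : List (List Int)) : Prop :=
  ∀ row ∈ G, G.length ≤ row.length
instance (G : List (List Int)) : Decidable (Pre_close_pedestrians G) := by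
  unfold Pre_close_pedestrians; infer_instance

def pvWitness_close_pedestrians : List (List Int) := [[0, 1, 0], [0, 0, 2], [0, 0, 0]]

def Spec_close_pedestrians (G : List (List Int)) (out : List (List Int)) : Prop := out = close_pedestrians_alt G
instance (G : List (List Int)) (out : List (List Int)) : Decidable (Spec_close_pedestrians G out) := by unfold Spec_close_pedestrians; infer_instance

-- ===== CLAIM (what is proved, stated in full; the proofs are below) =====
def Claim_equal_close_pedestrians : Prop := ∀ (G : List (List Int)), Dom_close_pedestrians G → Pre_close_pedestrians G → Spec_close_pedestrians G (close_pedestrians G)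

-- ===== LEMMAS AND PROOFS =====

-- getD / set / count groundwork
theorem pvGetD_lt {α : Type} (l : List α) (j : Nat) (d : α) (h : l.getD j d ≠ d) :
    j < l.length := by
  by_contra hc
  simp [List.getD_eq_getElem?_getD, List.getElem?_eq_none (by omega : l.length ≤ j)] at h

theorem pvGetD_set_self {α : Type} (l : List α) (i : Nat) (a d : α) (h : i < l.length) :
    (l.set i a).getD i d = a := by
  simp [List.getD_eq_getElem?_getD, h]

theorem pvGetD_set_ne {α : Type} (l : List α) (i j : Nat) (a d : α) (h : i ≠ j) :
    (l.set i a).getD j d = l.getD j d := by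
  simp [List.getD_eq_getElem?_getD, List.getElem?_set_ne h]

theorem pvGetD_set_true_mono (l : List Bool) (i j : Nat) (h : l.getD j false = true) :
    (l.set i true).getD j false = true := by
  by_cases hij : i = j
  · subst hij
    have hlt : i < l.length := pvGetD_lt l i false (by intro hc; rw [hc] at h; cases h)
    rw [pvGetD_set_self _ _ _ _ hlt]
  · rwa [pvGetD_set_ne _ _ _ _ _ hij]

theorem pvCount_set (l : List Bool) (i : Nat) (h : i < l.length) (hf : l.getD i false = false) :
    (l.set i true).count true = l.count true + 1 := by
  have h1 : l[i] = false := by simpa [List.getD_eq_getElem?_getD, List.getElem?_eq_getElem h] using hf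
  rw [List.set_eq_take_append_cons_drop]
  simp only [h, if_true]
  conv_rhs => rw [← List.take_append_drop i l, List.drop_eq_getElem_cons h]
  simp [List.count_append, h1]
  omega

theorem pvCount_lt (l : List Bool) (i : Nat) (h : i < l.length) (hf : l.getD i false = false) :
    l.count true < l.length := by
  have h1 : l[i] = false := by simpa [List.getD_eq_getElem?_getD, List.getElem?_eq_getElem h] using hf
  have hne : ¬ (∀ b ∈ l, true = b) := by
    intro hall; have := hall l[i] (l.getElem_mem h); simp [h1] at this
  have hle := List.count_le_length (a := true) (l := l)
  rcases Nat.lt_or_ge (l.count true) l.length with h2 | h2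
  · exact h2
  · exfalso; exact hne (List.count_eq_length.mp (by omega))

-- the generic worklist algorithm: pop a vertex, mark-and-push its unseen neighbours;
-- `push` abstracts the worklist discipline (queue for A, stack for B)
def pvWStep (push : List Nat → Nat → List Nat) (st : List Nat × List Bool) (v : Nat) :
    List Nat × List Bool :=
  if st.2.getD v false = false then (push st.1 v, st.2.set v true) else st

def pvWl (N : Nat → List Nat) (push : List Nat → Nat → List Nat) :
    Nat → List Nat → List Bool → List Bool
  | 0, _, seen => seen
  | _ + 1, [], seen => seen
  | f + 1, u :: w, seen =>
      match (N u).foldl (pvWStep push) (w, seen) with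
      | (w', seen') => pvWl N push f w' seen'

def pvReach (N : Nat → List Nat) (s j : Nat) : Prop :=
  Relation.ReflTransGen (fun a b => b ∈ N a) s j

-- facts about one inner fold (PushOk push := membership and length behaviour of push)
def PushOk (push : List Nat → Nat → List Nat) : Prop :=
  (∀ w v x, x ∈ push w v ↔ x ∈ w ∨ x = v) ∧ (∀ w v, (push w v).length = w.length + 1)

theorem pvFold_len (push : List Nat → Nat → List Nat) :
    ∀ (l : List Nat) (w : List Nat) (seen : List Bool),
    (l.foldl (pvWStep push) (w, seen)).2.length = seen.length := by
  intro l
  induction l with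
  | nil => intro w seen; rfl
  | cons v rest ih =>
      intro w seen
      simp only [List.foldl_cons, pvWStep]
      by_cases hv : seen.getD v false = false
      · simp only [hv, if_true]; rw [ih]; simp
      · simp only [hv]; exact ih w seen

theorem pvFold_mono (push : List Nat → Nat → List Nat) :
    ∀ (l : List Nat) (w : List Nat) (seen : List Bool) (j : Nat),
    seen.getD j false = true → (l.foldl (pvWStep push) (w, seen)).2.getD j false = true := by
  intro l
  induction l with
  | nil => intro w seen j h; exact h
  | cons v rest ih =>
      intro w seen j h
      simp only [List.foldl_cons, pvWStep]
      by_cases hv : seen.getD v false = false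
      · simp only [hv, if_true]; exact ih _ _ _ (pvGetD_set_true_mono _ _ _ h)
      · simp only [hv]; exact ih _ _ _ h

theorem pvFold_sub (push : List Nat → Nat → List Nat) (hp : PushOk push) :
    ∀ (l : List Nat) (w : List Nat) (seen : List Bool) (x : Nat),
    x ∈ w → x ∈ (l.foldl (pvWStep push) (w, seen)).1 := by
  intro l
  induction l with
  | nil => intro w seen x h; exact h
  | cons v rest ih =>
      intro w seen x h
      simp only [List.foldl_cons, pvWStep]
      by_cases hv : seen.getD v false = false
      · simp only [hv, if_true]; exact ih _ _ _ ((hp.1 _ _ _).mpr (Or.inl h))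
      · simp only [hv]; exact ih _ _ _ h

theorem pvFold_memw (push : List Nat → Nat → List Nat) (hp : PushOk push) :
    ∀ (l : List Nat) (w : List Nat) (seen : List Bool) (x : Nat),
    x ∈ (l.foldl (pvWStep push) (w, seen)).1 → x ∈ w ∨ x ∈ l := by
  intro l
  induction l with
  | nil => intro w seen x h; exact Or.inl h
  | cons v rest ih =>
      intro w seen x h
      simp only [List.foldl_cons, pvWStep] at h
      by_cases hv : seen.getD v false = false
      · simp only [hv, if_true] at h
        rcases ih _ _ _ h with h1 | h1
        · rcases (hp.1 _ _ _).mp h1 with h2 | h2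
          · exact Or.inl h2
          · exact Or.inr (by simp [h2])
        · exact Or.inr (List.mem_cons_of_mem _ h1)
      · simp only [hv] at h
        rcases ih _ _ _ h with h1 | h1
        · exact Or.inl h1
        · exact Or.inr (List.mem_cons_of_mem _ h1)

theorem pvFold_marked (push : List Nat → Nat → List Nat) :
    ∀ (l : List Nat) (w : List Nat) (seen : List Bool) (v : Nat),
    v ∈ l → v < seen.length → (l.foldl (pvWStep push) (w, seen)).2.getD v false = true := by
  intro l
  induction l with
  | nil => intro w seen v h; exact absurd h (List.not_mem_nil)
  | cons a rest ih =>
      intro w seen v hv hlen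
      simp only [List.foldl_cons, pvWStep]
      by_cases ha : seen.getD a false = false
      · simp only [ha, if_true]
        rcases List.mem_cons.mp hv with h1 | h1
        · subst h1
          exact pvFold_mono push rest _ _ v (pvGetD_set_self _ _ _ _ hlen)
        · exact ih _ _ _ h1 (by simpa using hlen)
      · simp only [ha]
        rcases List.mem_cons.mp hv with h1 | h1
        · subst h1
          exact pvFold_mono push rest _ _ v (by simpa using Bool.not_eq_false _ |>.mp ha)
        · exact ih _ _ _ h1 hlen

theorem pvFold_new_sound (push : List Nat → Nat → List Nat) :
    ∀ (l : List Nat) (w : List Nat) (seen : List Bool) (j : Nat),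
    (l.foldl (pvWStep push) (w, seen)).2.getD j false = true →
    seen.getD j false = true ∨ j ∈ l := by
  intro l
  induction l with
  | nil => intro w seen j h; exact Or.inl h
  | cons v rest ih =>
      intro w seen j h
      simp only [List.foldl_cons, pvWStep] at h
      by_cases hv : seen.getD v false = false
      · simp only [hv, if_true] at h
        rcases ih _ _ _ h with h1 | h1
        · by_cases hj : v = j
          · exact Or.inr (by simp [hj.symm])
          · rw [pvGetD_set_ne _ _ _ _ _ hj] at h1; exact Or.inl h1
        · exact Or.inr (List.mem_cons_of_mem _ h1)
      · simp only [hv] at h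
        rcases ih _ _ _ h with h1 | h1
        · exact Or.inl h1
        · exact Or.inr (List.mem_cons_of_mem _ h1)

theorem pvFold_new_inw (push : List Nat → Nat → List Nat) (hp : PushOk push) :
    ∀ (l : List Nat) (w : List Nat) (seen : List Bool) (j : Nat),
    (l.foldl (pvWStep push) (w, seen)).2.getD j false = true →
    seen.getD j false = true ∨ j ∈ (l.foldl (pvWStep push) (w, seen)).1 := by
  intro l
  induction l with
  | nil => intro w seen j h; exact Or.inl h
  | cons v rest ih =>
      intro w seen j h
      simp only [List.foldl_cons, pvWStep] at h ⊢
      by_cases hv : seen.getD v false = false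
      · simp only [hv, if_true] at h ⊢
        rcases ih _ _ _ h with h1 | h1
        · by_cases hj : v = j
          · subst hj
            exact Or.inr (pvFold_sub push hp rest _ _ v ((hp.1 _ _ _).mpr (Or.inr rfl)))
          · rw [pvGetD_set_ne _ _ _ _ _ hj] at h1; exact Or.inl h1
        · exact Or.inr h1
      · simp only [hv] at h ⊢
        exact ih _ _ _ h

theorem pvFold_measure (push : List Nat → Nat → List Nat) (hp : PushOk push) :
    ∀ (l : List Nat) (w : List Nat) (seen : List Bool),
    (∀ v ∈ l, v < seen.length) →
    (l.foldl (pvWStep push) (w, seen)).1.length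
      + (seen.length - (l.foldl (pvWStep push) (w, seen)).2.count true)
    = w.length + (seen.length - seen.count true) := by
  intro l
  induction l with
  | nil => intro w seen _; rfl
  | cons v rest ih =>
      intro w seen hl
      simp only [List.foldl_cons, pvWStep]
      by_cases hv : seen.getD v false = false
      · simp only [hv, if_true]
        have hvlen : v < seen.length := hl v (by simp)
        have h1 := ih (push w v) (seen.set v true)
          (by intro x hx; simpa using hl x (List.mem_cons_of_mem _ hx))
        rw [List.length_set] at h1
        rw [h1, hp.2, pvCount_set seen v hvlen hv]
        have := pvCount_lt seen v hvlen hv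
        omega
      · simp only [hv]
        exact ih w seen (fun x hx => hl x (List.mem_cons_of_mem _ hx))

-- the worklist loop computes exactly the reachable set
theorem pvWl_spec (N : Nat → List Nat) (push : List Nat → Nat → List Nat)
    (hp : PushOk push) (n s : Nat) (hN : ∀ u v, v ∈ N u → v < n) :
    ∀ (fuel : Nat) (w : List Nat) (seen : List Bool),
    seen.length = n →
    seen.getD s false = true →
    (∀ x ∈ w, seen.getD x false = true) →
    (∀ u, seen.getD u false = true → u ∉ w → ∀ v ∈ N u, seen.getD v false = true) →
    (∀ j, seen.getD j false = true → pvReach N s j) →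
    w.length + (n - seen.count true) ≤ fuel →
    ∀ j, (pvWl N push fuel w seen).getD j false = true ↔ pvReach N s j := by
  intro fuel
  induction fuel with
  | zero =>
      intro w seen hlen hs hws hfr hsound hm j
      have hw : w = [] := by
        cases w with
        | nil => rfl
        | cons a t => simp at hm
      subst hw
      simp only [pvWl]
      constructor
      · exact hsound j
      · intro hr
        induction hr with
        | refl => exact hs
        | tail hab hbc ihr => exact hfr _ ihr (List.not_mem_nil) _ hbc
  | succ f ih =>
      intro w seen hlen hs hws hfr hsound hm j
      cases w with
      | nil =>
          simp only [pvWl]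
          constructor
          · exact hsound j
          · intro hr
            induction hr with
            | refl => exact hs
            | tail hab hbc ihr => exact hfr _ ihr (List.not_mem_nil) _ hbc
      | cons u w =>
          simp only [pvWl]
          set r := (N u).foldl (pvWStep push) (w, seen) with hr
          have hNlen : ∀ v ∈ N u, v < seen.length := fun v hv => hlen ▸ hN u v hv
          have hlen' : r.2.length = n := by rw [pvFold_len]; exact hlen
          have hmono := pvFold_mono push (N u) w seen
          have hsub := pvFold_sub push hp (N u) w seen
          have hmemw := pvFold_memw push hp (N u) w seen
          have hmarked := pvFold_marked push (N u) w seen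
          have hnews := pvFold_new_sound push (N u) w seen
          have hnewi := pvFold_new_inw push hp (N u) w seen
          have hmeas := pvFold_measure push hp (N u) w seen hNlen
          rw [← hr] at hmeas
          have hru : pvReach N s u := hsound u (hws u (by simp))
          have h1 : r.2.getD s false = true := hmono s hs
          have h2 : ∀ x ∈ r.1, r.2.getD x false = true := by
            intro x hx
            rcases hmemw x hx with h | h
            · exact hmono x (hws x (List.mem_cons_of_mem _ h))
            · exact hmarked x h (hNlen x h)
          have h3 : ∀ u', r.2.getD u' false = true → u' ∉ r.1 →
              ∀ v ∈ N u', r.2.getD v false = true := by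
            intro u' hseen' hnw v hv
            by_cases huu : u' = u
            · subst huu; exact hmarked v hv (hNlen v hv)
            · rcases hnewi u' hseen' with hold | hinw
              · by_cases hw' : u' ∈ w
                · exact absurd (hsub u' hw') hnw
                · have : u' ∉ u :: w := by
                    intro hc; rcases List.mem_cons.mp hc with h | h
                    · exact huu h
                    · exact hw' h
                  exact hmono v (hfr u' hold this v hv)
              · exact absurd hinw hnw
          have h4 : ∀ j, r.2.getD j false = true → pvReach N s j := by
            intro j hj
            rcases hnews j hj with hold | hnu
            · exact hsound j hold
            · exact Relation.ReflTransGen.tail hru hnu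
          have h5 : r.1.length + (n - r.2.count true) ≤ f := by
            rw [hlen] at hmeas
            simp only [List.length_cons] at hm
            omega
          exact ih r.1 r.2 hlen' h1 h2 h3 h4 h5 j
-- B's DFS loop is the worklist loop with a stack (push = cons)
theorem pvDfs_eq_wl (adj : Nat → List Nat) :
    ∀ (f : Nat) (stk : List Nat) (seen : List Bool),
    pvDfsLoop adj f stk seen = pvWl adj (fun w v => v :: w) f stk seen := by
  intro f
  induction f with
  | zero => intro stk seen; rfl
  | succ f ih =>
      intro stk seen
      cases stk with
      | nil => rfl
      | cons u stk =>
          simp only [pvDfsLoop, pvWl, pvDfsStep]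
          exact ih _ _

-- the (visited, queue) components of A's inner loop are the worklist step with push = append
theorem pvStepA_proj (G : List (List Int)) (u : Nat) :
    ∀ (l : List Nat) (vis : List Bool) (dist : List Int) (par : List (Option Nat)) (q : List Nat),
    (l.foldl (fun st v =>
        if pvEdge G u v = true ∧ st.1.getD v false = false then
          (st.1.set v true, st.2.1.set v (st.2.1.getD u 0 + 1),
           st.2.2.1.set v (some u), st.2.2.2 ++ [v])
        else st)
      ((vis, dist, par, q) : List Bool × List Int × List (Option Nat) × List Nat)).1
      = ((l.filter (fun v => pvEdge G u v)).foldl (pvWStep (fun w v => w ++ [v])) (q, vis)).2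
    ∧ (l.foldl (fun st v =>
        if pvEdge G u v = true ∧ st.1.getD v false = false then
          (st.1.set v true, st.2.1.set v (st.2.1.getD u 0 + 1),
           st.2.2.1.set v (some u), st.2.2.2 ++ [v])
        else st)
      ((vis, dist, par, q) : List Bool × List Int × List (Option Nat) × List Nat)).2.2.2
      = ((l.filter (fun v => pvEdge G u v)).foldl (pvWStep (fun w v => w ++ [v])) (q, vis)).1 := by
  intro l
  induction l with
  | nil => intro vis dist par q; exact ⟨rfl, rfl⟩
  | cons v rest ih =>
      intro vis dist par q
      rw [List.foldl_cons, List.filter_cons]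
      by_cases he : pvEdge G u v = true
      · by_cases hv : vis.getD v false = false
        · simp only [he, hv, if_true, and_self, List.foldl_cons, pvWStep]
          exact ih _ _ _ _
        · have : ¬ (pvEdge G u v = true ∧ vis.getD v false = false) := by
            intro hc; exact hv hc.2
          simp only [he, if_true, List.foldl_cons, pvWStep, hv]
          exact ih _ _ _ _
      · have : ¬ (pvEdge G u v = true ∧ vis.getD v false = false) := by
          intro hc; exact he hc.1
        simp only [he]
        exact ih _ _ _ _

-- visited component of A's BFS loop = worklist loop over the adjacency lists, push = append
theorem pvBfsLoop_proj (G : List (List Int)) (n : Nat) :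
    ∀ (f : Nat) (vis : List Bool) (dist : List Int) (par : List (Option Nat)) (q : List Nat),
    (pvBfsLoop G n f vis dist par q).1 = pvWl (pvAdj G n) (fun w v => w ++ [v]) f q vis := by
  intro f
  induction f with
  | zero => intro vis dist par q; rfl
  | succ f ih =>
      intro vis dist par q
      cases q with
      | nil => rfl
      | cons u q =>
          have hproj := pvStepA_proj G u (List.range n) vis dist par q
          simp only [pvBfsLoop, pvBfsStep, pvWl, pvAdj]
          rw [ih]
          rw [hproj.1, hproj.2]
-- distance invariant of A's inner loop: distance[j] > 0 exactly on visited vertices other than s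
theorem pvStepA_inv (G : List (List Int)) (n s u : Nat) :
    ∀ (l : List Nat), (∀ v ∈ l, v < n) →
    ∀ (vis : List Bool) (dist : List Int) (par : List (Option Nat)) (q : List Nat),
    vis.length = n → dist.length = n →
    vis.getD u false = true → vis.getD s false = true →
    (∀ x ∈ q, vis.getD x false = true) →
    (∀ j, 0 < dist.getD j 0 ↔ (vis.getD j false = true ∧ j ≠ s)) →
    (∀ j, vis.getD j false = true → 0 ≤ dist.getD j 0) →
    (let a := l.foldl (fun st v =>
        if pvEdge G u v = true ∧ st.1.getD v false = false then
          (st.1.set v true, st.2.1.set v (st.2.1.getD u 0 + 1),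
           st.2.2.1.set v (some u), st.2.2.2 ++ [v])
        else st)
      ((vis, dist, par, q) : List Bool × List Int × List (Option Nat) × List Nat)
     a.1.length = n ∧ a.2.1.length = n ∧ a.1.getD u false = true ∧ a.1.getD s false = true ∧
     (∀ x ∈ a.2.2.2, a.1.getD x false = true) ∧
     (∀ j, 0 < a.2.1.getD j 0 ↔ (a.1.getD j false = true ∧ j ≠ s)) ∧
     (∀ j, a.1.getD j false = true → 0 ≤ a.2.1.getD j 0)) := by
  intro l
  induction l with
  | nil =>
      intro _ vis dist par q h1 h2 h3 h4 h5 h6 h7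
      exact ⟨h1, h2, h3, h4, h5, h6, h7⟩
  | cons v rest ih =>
      intro hl vis dist par q h1 h2 h3 h4 h5 h6 h7
      have hlrest : ∀ x ∈ rest, x < n := fun x hx => hl x (List.mem_cons_of_mem _ hx)
      rw [List.foldl_cons]
      by_cases hg : pvEdge G u v = true ∧ vis.getD v false = false
      · simp only [hg]
        have hvn : v < n := hl v (by simp)
        have hvv : v < vis.length := h1 ▸ hvn
        have hvd : v < dist.length := h2 ▸ hvn
        have hvs : v ≠ s := by
          intro hc; rw [hc] at hg; rw [h4] at hg; exact absurd hg.2 (by simp)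
        have hdu : 0 ≤ dist.getD u 0 := h7 u h3
        refine ih hlrest _ _ _ _ ?_ ?_ ?_ ?_ ?_ ?_ ?_
        · simpa using h1
        · simpa using h2
        · exact pvGetD_set_true_mono _ _ _ h3
        · exact pvGetD_set_true_mono _ _ _ h4
        · intro x hx
          rcases List.mem_append.mp hx with hx | hx
          · exact pvGetD_set_true_mono _ _ _ (h5 x hx)
          · rw [List.mem_singleton.mp hx]
            exact pvGetD_set_self _ _ _ _ hvv
        · intro j
          by_cases hj : v = j
          · subst hj
            rw [pvGetD_set_self _ _ _ _ hvv, pvGetD_set_self _ _ _ _ hvd]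
            constructor
            · intro _; exact ⟨rfl, hvs⟩
            · intro _; omega
          · rw [pvGetD_set_ne _ _ _ _ _ hj, pvGetD_set_ne _ _ _ _ _ hj]
            exact h6 j
        · intro j hj
          by_cases hjv : v = j
          · subst hjv
            rw [pvGetD_set_self _ _ _ _ hvd]
            omega
          · rw [pvGetD_set_ne _ _ _ _ _ hjv] at hj ⊢
            exact h7 j hj
      · simp only [hg, if_false]
        exact ih hlrest _ _ _ _ h1 h2 h3 h4 h5 h6 h7

theorem pvBfsLoop_inv (G : List (List Int)) (n s : Nat) :
    ∀ (f : Nat) (vis : List Bool) (dist : List Int) (par : List (Option Nat)) (q : List Nat),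
    vis.length = n → dist.length = n →
    vis.getD s false = true →
    (∀ x ∈ q, vis.getD x false = true) →
    (∀ j, 0 < dist.getD j 0 ↔ (vis.getD j false = true ∧ j ≠ s)) →
    (∀ j, vis.getD j false = true → 0 ≤ dist.getD j 0) →
    ∀ j, 0 < (pvBfsLoop G n f vis dist par q).2.1.getD j 0 ↔
      ((pvBfsLoop G n f vis dist par q).1.getD j false = true ∧ j ≠ s) := by
  intro f
  induction f with
  | zero =>
      intro vis dist par q _ _ _ _ h6 _ j
      exact h6 j
  | succ f ih =>
      intro vis dist par q h1 h2 h4 h5 h6 h7 j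
      cases q with
      | nil => exact h6 j
      | cons u q =>
          have hu : vis.getD u false = true := h5 u (by simp)
          have hstep := pvStepA_inv G n s u (List.range n) (by intro v hv; exact List.mem_range.mp hv)
            vis dist par q h1 h2 hu h4 (fun x hx => h5 x (List.mem_cons_of_mem _ hx)) h6 h7
          simp only at hstep
          simp only [pvBfsLoop, pvBfsStep]
          exact ih _ _ _ _ hstep.1 hstep.2.1 hstep.2.2.2.1 hstep.2.2.2.2.1
            hstep.2.2.2.2.2.1 hstep.2.2.2.2.2.2 j

-- the initial seen array
theorem pvSeen0_getD (n s j : Nat) (hs : s < n) :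
    ((List.replicate n false).set s true).getD j false = true ↔ j = s := by
  constructor
  · intro h
    by_contra hc
    rw [pvGetD_set_ne _ _ _ _ _ (fun hx => hc hx.symm)] at h
    rcases Nat.lt_or_ge j n with hj | hj
    · simp [List.getD_eq_getElem?_getD, hj] at h
    · simp [List.getD_eq_getElem?_getD, List.getElem?_eq_none (by simpa using hj : (List.replicate n false).length ≤ j)] at h
  · intro h; subst h
    exact pvGetD_set_self _ _ _ _ (by simpa using hs)

theorem pvSeen0_count (n s : Nat) (hs : s < n) :
    ((List.replicate n false).set s true).count true = 1 := by
  rw [pvCount_set _ _ (by simpa using hs)]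
  · simp [List.count_replicate]
  · rcases Nat.lt_or_ge s n with h | h
    · simp [List.getD_eq_getElem?_getD, h]
    · omega

-- per-source agreement: A's distances are positive exactly where B's DFS marks j ≠ s
theorem pvPerSource (G : List (List Int)) (s : Nat) (hs : s < G.length) :
    ∀ j, (0 < (pvBFS G s).getD j 0 ↔
      ((pvDfsLoop (pvAdj G G.length) G.length [s]
          ((List.replicate G.length false).set s true)).getD j false = true ∧ j ≠ s)) := by
  intro j
  have hn : 0 < G.length := by omega
  have hN : ∀ u v, v ∈ pvAdj G G.length u → v < G.length := by
    intro u v hv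
    exact List.mem_range.mp (List.mem_of_mem_filter hv)
  have hlen0 : ((List.replicate G.length false).set s true).length = G.length := by simp
  have hgs : ((List.replicate G.length false).set s true).getD s false = true :=
    (pvSeen0_getD _ _ _ hs).mpr rfl
  have hws : ∀ x ∈ [s], ((List.replicate G.length false).set s true).getD x false = true := by
    intro x hx; rw [List.mem_singleton.mp hx]; exact hgs
  have hfr : ∀ u, ((List.replicate G.length false).set s true).getD u false = true → u ∉ [s] →
      ∀ v ∈ pvAdj G G.length u, ((List.replicate G.length false).set s true).getD v false = true := by
    intro u hu hnu
    exact absurd (by simp [(pvSeen0_getD _ _ _ hs).mp hu]) hnu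
  have hsound : ∀ j', ((List.replicate G.length false).set s true).getD j' false = true →
      pvReach (pvAdj G G.length) s j' := by
    intro j' hj'
    rw [(pvSeen0_getD _ _ _ hs).mp hj']
    exact Relation.ReflTransGen.refl
  have hmeas : ([s] : List Nat).length +
      (G.length - ((List.replicate G.length false).set s true).count true) ≤ G.length := by
    rw [pvSeen0_count _ _ hs]; simp; omega
  -- B side
  have hpc : PushOk (fun w v => v :: w) := by
    constructor
    · intro w v x; simp [List.mem_cons]; tauto
    · intro w v; simp
  have hB := pvWl_spec (pvAdj G G.length) (fun w v => v :: w) hpc G.length s hN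
    G.length [s] _ hlen0 hgs hws hfr hsound hmeas j
  rw [← pvDfs_eq_wl] at hB
  -- A side
  have hpa : PushOk (fun w v => w ++ [v]) := by
    constructor
    · intro w v x; simp
    · intro w v; simp
  have hA := pvWl_spec (pvAdj G G.length) (fun w v => w ++ [v]) hpa G.length s hN
    G.length [s] _ hlen0 hgs hws hfr hsound hmeas j
  rw [← pvBfsLoop_proj G G.length G.length
    ((List.replicate G.length false).set s true)
    ((List.replicate G.length (-1 : Int)).set s 0)
    (List.replicate G.length (none : Option Nat)) [s]] at hA
  -- distance characterisation on the A side
  have hdinv := pvBfsLoop_inv G G.length s G.length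
    ((List.replicate G.length false).set s true)
    ((List.replicate G.length (-1 : Int)).set s 0)
    (List.replicate G.length (none : Option Nat)) [s]
    hlen0 (by simp) hgs hws
    (by
      intro j'
      constructor
      · intro hj'
        exfalso
        by_cases hj : j' = s
        · subst hj
          rw [pvGetD_set_self _ _ _ _ (by simpa using hs)] at hj'
          omega
        · rw [pvGetD_set_ne _ _ _ _ _ (fun hx => hj hx.symm)] at hj'
          rcases Nat.lt_or_ge j' G.length with h | h
          · simp [List.getD_eq_getElem?_getD, h] at hj'
          · simp [List.getD_eq_getElem?_getD,
              List.getElem?_eq_none (by simpa using h : (List.replicate G.length (-1 : Int)).length ≤ j')] at hj'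
      · intro hj'
        exfalso
        exact hj'.2 ((pvSeen0_getD _ _ _ hs).mp hj'.1))
    (by
      intro j' hj'
      rw [(pvSeen0_getD _ _ _ hs).mp hj']
      rw [pvGetD_set_self _ _ _ _ (by simpa using hs)])
    j
  show 0 < ((pvBfsLoop G G.length G.length _ _ _ [s]).2.1.getD j 0) ↔ _
  rw [hdinv, hA, ← hB]


-- ===== VERDICT (by name: the statement is the Claim_ definition above) =====
theorem close_pedestrians_spec : Claim_equal_close_pedestrians := by
  intro G _ _
  unfold Spec_close_pedestrians
  simp only [close_pedestrians, close_pedestrians_alt]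
  apply List.map_congr_left
  intro i hi
  apply List.map_congr_left
  intro j _
  exact if_congr (pvPerSource G i (List.mem_range.mp hi) j) rfl rfl
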